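-- pv_equiv track=rewrite | github.com/wxcv-ai/Crypto_Arbitrage | arbitrage.py | currency_and_pairs
-- ===== SOURCE A (Python) =====
-- def currency_and_pairs(pairs,currencies) :
-- 	data = {}
-- 	for currency in currencies :
-- 		partitial_data = []
-- 		for pair in pairs :
-- 			# this is the position of the "/" in the pair in order to seperate tge base and the quote currencies
-- 			pos= pair.find('/')
-- 			#the next two line is for the base and the quote currencies
-- 			base = pair[:pos]
-- 			quote = pair[pos+1:]
-- 			if currency == base or currency == quote :
-- 				partitial_data.append(pair)
-- 				data[currency] = partitial_data
-- 	return(data)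
-- ===== SOURCE B (Python) =====
-- def currency_and_pairs(pairs, currencies):
--     # one pass over pairs: key each pair by its base and quote, group into an index,
--     # then project the index onto the currency list (first occurrences win).
--     keyed = []
--     for pair in pairs:
--         pos = pair.find('/')
--         base = pair[:pos]
--         quote = pair[pos + 1:]
--         keyed.append((base, pair))
--         if quote != base:
--             keyed.append((quote, pair))
--     index = {}
--     for k, p in keyed:
--         index.setdefault(k, []).append(p)
--     return {c: index[c] for c in currencies if c in index}
-- ===== Notes on version B (the rewrite author's own statement) =====
-- stated objective: faster
-- what changed: Instead of rescanning all pairs for every currency, B makes one pass over the pairs keying each by its base and quote into an index dict and then projects the index onto the currency list.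
import Mathlib
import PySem

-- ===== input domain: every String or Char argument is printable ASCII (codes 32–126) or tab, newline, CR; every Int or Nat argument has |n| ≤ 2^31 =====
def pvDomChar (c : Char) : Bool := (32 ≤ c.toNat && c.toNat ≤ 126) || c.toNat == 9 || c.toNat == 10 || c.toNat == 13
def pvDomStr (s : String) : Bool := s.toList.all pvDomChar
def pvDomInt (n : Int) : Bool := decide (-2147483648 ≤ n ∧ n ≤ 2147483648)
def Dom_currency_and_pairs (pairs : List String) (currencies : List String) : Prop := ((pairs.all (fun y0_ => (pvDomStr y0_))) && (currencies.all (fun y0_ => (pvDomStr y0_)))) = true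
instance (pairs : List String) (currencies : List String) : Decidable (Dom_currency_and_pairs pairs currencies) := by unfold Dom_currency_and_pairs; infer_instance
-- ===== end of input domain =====

-- B replaces A's per-currency rescan of all pairs by a single pass that keys each pair
-- by its base and quote into an index dict, then projects the index onto the currency
-- list: O(P + C) instead of O(C * P).


-- ===== PORT A =====
-- literal port of A: for each currency, scan all pairs, growing partitial_data and
-- re-inserting data[currency] on every match.
def currency_and_pairs (pairs : List String) (currencies : List String) : List (String × List String) :=
  (currencies.foldl
    (fun (data : PySem.Dict String (List String)) currency =>
      (pairs.foldl
        (fun (st : List String × PySem.Dict String (List String)) pair =>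
          let pos := PySem.Str.find pair "/"
          let base := PySem.Str.slice pair none (some pos)
          let quote := PySem.Str.slice pair (some (pos + 1)) none
          if currency == base || currency == quote then
            let pd := st.1 ++ [pair]
            (pd, st.2.insert currency pd)
          else st)
        ([], data)).2)
    PySem.Dict.empty).items

-- ===== PORT B =====
-- port of B (Source B): key each pair by base and quote, group into an index dict,
-- then project onto the currency list.
def currency_and_pairs_alt (pairs : List String) (currencies : List String) : List (String × List String) :=
  let keyed := pairs.foldl
    (fun (acc : List (String × String)) pair =>
      let pos := PySem.Str.find pair "/"
      let base := PySem.Str.slice pair none (some pos)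
      let quote := PySem.Str.slice pair (some (pos + 1)) none
      let acc := acc ++ [(base, pair)]
      if quote != base then acc ++ [(quote, pair)] else acc)
    []
  let index := keyed.foldl
    (fun (d : PySem.Dict String (List String)) kp =>
      d.modify kp.1 [] (fun l => l ++ [kp.2]))  -- index.setdefault(k, []).append(p)
    PySem.Dict.empty
  (currencies.foldl
    (fun (out : PySem.Dict String (List String)) c =>
      match index.get? c with
      | some l => out.insert c l
      | none => out)
    PySem.Dict.empty).items

-- ===== PRECONDITION & SPEC =====
def Spec_currency_and_pairs (pairs : List String) (currencies : List String) (out : List (String × List String)) : Prop := out = currency_and_pairs_alt pairs currencies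
instance (pairs : List String) (currencies : List String) (out : List (String × List String)) : Decidable (Spec_currency_and_pairs pairs currencies out) := by unfold Spec_currency_and_pairs; infer_instance

-- ===== CLAIM (what is proved, stated in full; the proofs are below) =====
def Claim_equal_currency_and_pairs : Prop := ∀ (pairs : List String) (currencies : List String), Dom_currency_and_pairs pairs currencies → Spec_currency_and_pairs pairs currencies (currency_and_pairs pairs currencies)

-- ===== LEMMAS AND PROOFS =====

-- "pair contains currency c" — A's match condition
def pvMp (c pair : String) : Bool :=
  let pos := PySem.Str.find pair "/"
  c == PySem.Str.slice pair none (some pos) || c == PySem.Str.slice pair (some (pos + 1)) none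

-- the pairs matching c, in order
def pvMatches (c : String) (pairs : List String) : List String := pairs.filter (pvMp c)

-- the common canonical form both ports reduce to
def pvCanon (pairs : List String) (currencies : List String) : List (String × List String) :=
  (currencies.foldl
    (fun (d : PySem.Dict String (List String)) c =>
      if pvMatches c pairs = [] then d else d.insert c (pvMatches c pairs))
    PySem.Dict.empty).items

-- A's inner loop over pairs, for one currency c
lemma pvInnerA (c : String) (pairs : List String) (p0 : List String)
    (d : PySem.Dict String (List String)) :
    pairs.foldl
      (fun (st : List String × PySem.Dict String (List String)) pair =>
        let pos := PySem.Str.find pair "/"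
        let base := PySem.Str.slice pair none (some pos)
        let quote := PySem.Str.slice pair (some (pos + 1)) none
        if c == base || c == quote then
          let pd := st.1 ++ [pair]
          (pd, st.2.insert c pd)
        else st)
      (p0, d)
    = (p0 ++ pvMatches c pairs,
       if pvMatches c pairs = [] then d else d.insert c (p0 ++ pvMatches c pairs)) := by
  induction pairs generalizing p0 d with
  | nil => simp [pvMatches]
  | cons p ps ih =>
    simp only [List.foldl_cons]
    by_cases h : pvMp c p
    · have hc : pvMatches c (p :: ps) = p :: pvMatches c ps := by
        simp [pvMatches, h]
      simp only [pvMp] at h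
      simp only [h, if_pos, ih, hc]
      by_cases hM : pvMatches c ps = []
      · simp [hM]
      · simp [hM, PySem.Dict.insert_insert_self]
    · have hc : pvMatches c (p :: ps) = pvMatches c ps := by
        simp [pvMatches, h]
      simp only [pvMp] at h
      simp only [Bool.not_eq_true] at h
      simp only [h, if_neg, Bool.false_eq_true, not_false_iff, ih, hc]

-- A reduces to the canonical form
lemma pvAeq (pairs currencies : List String) :
    currency_and_pairs pairs currencies = pvCanon pairs currencies := by
  unfold currency_and_pairs pvCanon
  congr 1
  refine PySem.List.foldl_congr_mem _ _ _ _ ?_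
  intro data currency _
  rw [pvInnerA]
  simp only [List.nil_append]

-- B's keyed list is a flatMap of per-pair entries
def pvEntry (pair : String) : List (String × String) :=
  let pos := PySem.Str.find pair "/"
  let base := PySem.Str.slice pair none (some pos)
  let quote := PySem.Str.slice pair (some (pos + 1)) none
  if quote != base then [(base, pair), (quote, pair)] else [(base, pair)]

lemma pvKeyedEq (pairs : List String) (acc0 : List (String × String)) :
    pairs.foldl
      (fun (acc : List (String × String)) pair =>
        let pos := PySem.Str.find pair "/"
        let base := PySem.Str.slice pair none (some pos)
        let quote := PySem.Str.slice pair (some (pos + 1)) none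
        let acc := acc ++ [(base, pair)]
        if quote != base then acc ++ [(quote, pair)] else acc)
      acc0
    = acc0 ++ pairs.flatMap pvEntry := by
  induction pairs generalizing acc0 with
  | nil => simp
  | cons p ps ih =>
    simp only [List.foldl_cons, List.flatMap_cons, ih, pvEntry]
    split <;> simp [List.append_assoc]

-- projecting an entry-shaped list onto key c keeps the pair iff c is its base or quote
lemma pvEntryFilterGen (c b q pair : String) :
    ((if q != b then [(b, pair), (q, pair)] else [(b, pair)]).filter
        (fun kp => kp.1 == c)).map (fun kp => kp.2)
      = if (c == b || c == q) then [pair] else [] := by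
  by_cases hqb : q = b
  · subst hqb
    by_cases hc : c = q
    · simp [hc]
    · simp [hc, Ne.symm hc]
  · by_cases hcb : c = b
    · subst hcb
      simp [hqb]
    · by_cases hcq : c = q
      · subst hcq
        simp [hqb, Ne.symm hcb]
      · simp [hqb, Ne.symm hcb, Ne.symm hcq, hcb, hcq]

lemma pvEntryFilter (c pair : String) :
    ((pvEntry pair).filter (fun kp => kp.1 == c)).map (fun kp => kp.2)
      = if pvMp c pair then [pair] else [] := by
  unfold pvEntry pvMp
  exact pvEntryFilterGen c _ _ pair

-- the grouped projection of the keyed list is exactly pvMatches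
lemma pvKeyedFilter (c : String) (pairs : List String) :
    ((pairs.flatMap pvEntry).filter (fun kp => kp.1 == c)).map (fun kp => kp.2)
      = pvMatches c pairs := by
  induction pairs with
  | nil => simp [pvMatches]
  | cons p ps ih =>
    simp only [List.flatMap_cons, List.filter_append, List.map_append, ih]
    rw [pvEntryFilter]
    by_cases h : pvMp c p <;> simp [pvMatches, h]

-- a key occurs in the keyed list iff some pair matches it
lemma pvKeyMem (keyed : List (String × String)) (c : String) (M : List String)
    (h : M = (keyed.filter (fun kp => kp.1 == c)).map (fun kp => kp.2)) :
    c ∈ keyed.map (fun kp => kp.1) ↔ M ≠ [] := by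
  subst h
  simp only [ne_eq, List.map_eq_nil_iff, List.filter_eq_nil_iff, List.mem_map]
  constructor
  · rintro ⟨kp, hkp, rfl⟩ hall
    exact hall kp hkp (by simp)
  · intro hne
    by_contra hno
    apply hne
    intro kp hkp hbe
    exact hno ⟨kp, hkp, by simpa using hbe⟩

-- the index dict's lookup, characterised
lemma pvIndexGet (pairs : List String) (c : String) :
    ((pairs.flatMap pvEntry).foldl
        (fun (d : PySem.Dict String (List String)) kp =>
          d.modify kp.1 [] (fun l => l ++ [kp.2]))
        PySem.Dict.empty).get? c
      = if pvMatches c pairs = [] then none else some (pvMatches c pairs) := by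
  have hgetD : ((pairs.flatMap pvEntry).foldl
      (fun (d : PySem.Dict String (List String)) kp =>
        d.modify kp.1 [] (fun l => l ++ [kp.2])) PySem.Dict.empty).getD c []
      = pvMatches c pairs := by
    rw [PySem.Dict.getD_foldl_modify_append, PySem.Dict.getD_empty, List.nil_append,
      ← pvKeyedFilter c pairs]
  have hkeys : ((pairs.flatMap pvEntry).foldl
      (fun (d : PySem.Dict String (List String)) kp =>
        d.modify kp.1 [] (fun l => l ++ [kp.2])) PySem.Dict.empty).keys
      = PySem.Set.update ([] : List String) ((pairs.flatMap pvEntry).map (fun kp => kp.1)) := by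
    rw [PySem.Dict.keys_foldl_modify_key (pairs.flatMap pvEntry) (fun kp => kp.1) []
      (fun _ kp => fun l => l ++ [kp.2]) PySem.Dict.empty, PySem.Dict.keys_empty]
  have hmem : c ∈ ((pairs.flatMap pvEntry).foldl
      (fun (d : PySem.Dict String (List String)) kp =>
        d.modify kp.1 [] (fun l => l ++ [kp.2])) PySem.Dict.empty).keys
      ↔ pvMatches c pairs ≠ [] := by
    rw [hkeys, PySem.Set.mem_update]
    simp only [List.not_mem_nil, false_or]
    exact pvKeyMem _ c _ (pvKeyedFilter c pairs).symm
  by_cases hM : pvMatches c pairs = []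
  · rw [if_pos hM, PySem.Dict.get?_eq_none_iff_contains, ← Bool.not_eq_true,
      PySem.Dict.contains_iff_mem_keys, hmem]
    simp [hM]
  · rw [if_neg hM]
    have hc := (PySem.Dict.contains_iff_mem_keys _ c).2 (hmem.2 hM)
    cases hg : ((pairs.flatMap pvEntry).foldl
        (fun (d : PySem.Dict String (List String)) kp =>
          d.modify kp.1 [] (fun l => l ++ [kp.2])) PySem.Dict.empty).get? c with
    | none => exact absurd ((PySem.Dict.get?_eq_none_iff_contains _ _).1 hg) (by simp [hc])
    | some v =>
      have hv : pvMatches c pairs = v := by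
        rw [← hgetD, PySem.Dict.getD_eq_get?_getD, hg]
        rfl
      rw [hv]

-- B reduces to the canonical form
lemma pvBeq (pairs currencies : List String) :
    currency_and_pairs_alt pairs currencies = pvCanon pairs currencies := by
  unfold currency_and_pairs_alt pvCanon
  simp only [pvKeyedEq pairs [], List.nil_append]
  congr 1
  refine PySem.List.foldl_congr_mem _ _ _ _ ?_
  intro out c _
  rw [pvIndexGet]
  by_cases hM : pvMatches c pairs = []
  · simp only [hM, if_pos]
  · simp [hM]

-- ===== VERDICT (by name: the statement is the Claim_ definition above) =====
theorem currency_and_pairs_spec : Claim_equal_currency_and_pairs := by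
  intro pairs currencies _
  unfold Spec_currency_and_pairs
  rw [pvAeq, pvBeq]
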